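-- pv_equiv track=rewrite | github.com/PranavLabs/ecocheck | app.py | analyze_vibe
-- ===== SOURCE A (Python) =====
-- def analyze_vibe(found_labels):
--     categories = {
--         "Nature & Animals": ['bird', 'potted plant', 'dog', 'cat', 'horse', 'sheep', 'cow', 'elephant', 'bear', 'zebra', 'giraffe'],
--         "Green Transport": ['bicycle', 'bench'],
--         "High Emission": ['car', 'motorcycle', 'bus', 'truck', 'boat', 'airplane'],
--         "Waste & Plastic": ['bottle', 'cup', 'wine glass', 'fork', 'knife', 'spoon', 'bowl'],
--         "Electronics": ['tv', 'laptop', 'mouse', 'keyboard', 'cell phone', 'microwave', 'oven', 'refrigerator', 'toaster']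
--     }
--     return {cat: [l for l in found_labels if l in items] for cat, items in categories.items()}
-- ===== SOURCE B (Python) =====
-- _CAT_NAMES = ("Nature & Animals", "Green Transport", "High Emission", "Waste & Plastic", "Electronics")
--
-- _IDX = {
--     'bird': 0, 'potted plant': 0, 'dog': 0, 'cat': 0, 'horse': 0, 'sheep': 0,
--     'cow': 0, 'elephant': 0, 'bear': 0, 'zebra': 0, 'giraffe': 0,
--     'bicycle': 1, 'bench': 1,
--     'car': 2, 'motorcycle': 2, 'bus': 2, 'truck': 2, 'boat': 2, 'airplane': 2,
--     'bottle': 3, 'cup': 3, 'wine glass': 3, 'fork': 3, 'knife': 3, 'spoon': 3, 'bowl': 3,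
--     'tv': 4, 'laptop': 4, 'mouse': 4, 'keyboard': 4, 'cell phone': 4,
--     'microwave': 4, 'oven': 4, 'refrigerator': 4, 'toaster': 4,
-- }
--
-- def analyze_vibe(found_labels):
--     buckets = ([], [], [], [], [])
--     for l in found_labels:
--         i = _IDX.get(l)
--         if i is not None:
--             buckets[i].append(l)
--     return {name: bucket for name, bucket in zip(_CAT_NAMES, buckets)}
-- ===== Notes on version B (the rewrite author's own statement) =====
-- stated objective: idiomatic
-- what changed: Replaces the per-category rescans of found_labels (one filter pass over the whole input per category) by a hardcoded inverted label-to-bucket-number index and a single pass over found_labels dispatching each known label into one of five bucket lists, assembled into the result at the end.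
import Mathlib
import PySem

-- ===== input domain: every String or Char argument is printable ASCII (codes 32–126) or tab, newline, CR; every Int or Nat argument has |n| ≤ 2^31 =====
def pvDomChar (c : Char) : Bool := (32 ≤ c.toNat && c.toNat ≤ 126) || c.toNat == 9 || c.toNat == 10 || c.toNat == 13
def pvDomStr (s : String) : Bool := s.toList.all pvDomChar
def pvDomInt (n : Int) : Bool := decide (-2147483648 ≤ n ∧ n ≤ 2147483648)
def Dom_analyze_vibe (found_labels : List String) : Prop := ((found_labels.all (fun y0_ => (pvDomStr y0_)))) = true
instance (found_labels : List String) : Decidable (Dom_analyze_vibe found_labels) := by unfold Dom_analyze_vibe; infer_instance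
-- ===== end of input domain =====

-- B replaces A's per-category rescans of found_labels by a hardcoded inverted
-- label→bucket-number index and one recursive pass dispatching each known label
-- into one of five bucket lists assembled at the end (idiomatic single pass).
set_option maxRecDepth 10000
set_option maxHeartbeats 2000000


-- ===== PORT A =====
-- the constant `categories` dict, as an insertion-ordered association list
def pvCategories : List (String × List String) :=
  [("Nature & Animals", ["bird", "potted plant", "dog", "cat", "horse", "sheep", "cow", "elephant", "bear", "zebra", "giraffe"]),
   ("Green Transport", ["bicycle", "bench"]),
   ("High Emission", ["car", "motorcycle", "bus", "truck", "boat", "airplane"]),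
   ("Waste & Plastic", ["bottle", "cup", "wine glass", "fork", "knife", "spoon", "bowl"]),
   ("Electronics", ["tv", "laptop", "mouse", "keyboard", "cell phone", "microwave", "oven", "refrigerator", "toaster"])]

-- {cat: [l for l in found_labels if l in items] for cat, items in categories.items()}
def analyze_vibe (found_labels : List String) : List (String × List String) :=
  pvCategories.map (fun ci => (ci.1, found_labels.filter (fun l => ci.2.contains l)))

-- ===== PORT B =====
-- _IDX = {'bird': 0, …, 'toaster': 4} (hardcoded inverted index, label → bucket number)
def pvIdx : PySem.Dict String Int := PySem.Dict.mk
  [("bird", 0), ("potted plant", 0), ("dog", 0), ("cat", 0), ("horse", 0), ("sheep", 0),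
   ("cow", 0), ("elephant", 0), ("bear", 0), ("zebra", 0), ("giraffe", 0),
   ("bicycle", 1), ("bench", 1),
   ("car", 2), ("motorcycle", 2), ("bus", 2), ("truck", 2), ("boat", 2), ("airplane", 2),
   ("bottle", 3), ("cup", 3), ("wine glass", 3), ("fork", 3), ("knife", 3), ("spoon", 3), ("bowl", 3),
   ("tv", 4), ("laptop", 4), ("mouse", 4), ("keyboard", 4), ("cell phone", 4),
   ("microwave", 4), ("oven", 4), ("refrigerator", 4), ("toaster", 4)]

-- the for-loop: i = _IDX.get(l); if i is not None: buckets[i].append(l)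
def pvFill : List String → List String → List String → List String → List String → List String →
    List String × List String × List String × List String × List String
  | [], b0, b1, b2, b3, b4 => (b0, b1, b2, b3, b4)
  | l :: rest, b0, b1, b2, b3, b4 =>
    match pvIdx.get? l with
    | some 0 => pvFill rest (b0 ++ [l]) b1 b2 b3 b4
    | some 1 => pvFill rest b0 (b1 ++ [l]) b2 b3 b4
    | some 2 => pvFill rest b0 b1 (b2 ++ [l]) b3 b4
    | some 3 => pvFill rest b0 b1 b2 (b3 ++ [l]) b4
    | some _ => pvFill rest b0 b1 b2 b3 (b4 ++ [l])
    | none => pvFill rest b0 b1 b2 b3 b4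

-- return {name: bucket for name, bucket in zip(_CAT_NAMES, buckets)}
def analyze_vibe_alt (found_labels : List String) : List (String × List String) :=
  match pvFill found_labels [] [] [] [] [] with
  | (b0, b1, b2, b3, b4) =>
    [("Nature & Animals", b0), ("Green Transport", b1), ("High Emission", b2),
     ("Waste & Plastic", b3), ("Electronics", b4)]

-- ===== PRECONDITION & SPEC =====
def Spec_analyze_vibe (found_labels : List String) (out : List (String × List String)) : Prop := out = analyze_vibe_alt found_labels
instance (found_labels : List String) (out : List (String × List String)) : Decidable (Spec_analyze_vibe found_labels out) := by unfold Spec_analyze_vibe; infer_instance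

-- ===== CLAIM =====
def Claim_equal_analyze_vibe : Prop := ∀ (found_labels : List String), Dom_analyze_vibe found_labels → Spec_analyze_vibe found_labels (analyze_vibe found_labels)

-- ===== LEMMAS AND PROOFS =====

-- all 35 known labels, in index order
def pvLabels : List String :=
  ["bird", "potted plant", "dog", "cat", "horse", "sheep", "cow", "elephant", "bear", "zebra", "giraffe",
   "bicycle", "bench", "car", "motorcycle", "bus", "truck", "boat", "airplane",
   "bottle", "cup", "wine glass", "fork", "knife", "spoon", "bowl",
   "tv", "laptop", "mouse", "keyboard", "cell phone", "microwave", "oven", "refrigerator", "toaster"]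

-- a label outside pvLabels is absent from the index and belongs to no category list
lemma pvIdx_get_none (x : String) (hx : x ∉ pvLabels) : pvIdx.get? x = none := by
  simp only [pvLabels, List.mem_cons, List.not_mem_nil, or_false, not_or] at hx
  obtain ⟨n1,n2,n3,n4,n5,n6,n7,n8,n9,n10,n11,n12,n13,n14,n15,n16,n17,n18,n19,n20,
         n21,n22,n23,n24,n25,n26,n27,n28,n29,n30,n31,n32,n33,n34,n35⟩ := hx
  simp only [pvIdx]
  simp [PySem.Dict.get?_mk_cons, beq_iff_eq,
        Ne.symm n1, Ne.symm n2, Ne.symm n3, Ne.symm n4, Ne.symm n5, Ne.symm n6, Ne.symm n7,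
        Ne.symm n8, Ne.symm n9, Ne.symm n10, Ne.symm n11, Ne.symm n12, Ne.symm n13, Ne.symm n14,
        Ne.symm n15, Ne.symm n16, Ne.symm n17, Ne.symm n18, Ne.symm n19, Ne.symm n20, Ne.symm n21,
        Ne.symm n22, Ne.symm n23, Ne.symm n24, Ne.symm n25, Ne.symm n26, Ne.symm n27, Ne.symm n28,
        Ne.symm n29, Ne.symm n30, Ne.symm n31, Ne.symm n32, Ne.symm n33, Ne.symm n34, Ne.symm n35]
  simp [PySem.Dict.get?, List.find?]

-- loop invariant: B's pass from a bucket state appends each category's filter of xs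
lemma pvLoop (xs : List String) (g0 g1 g2 g3 g4 : List String) :
    pvFill xs g0 g1 g2 g3 g4 =
    (g0 ++ xs.filter (fun l => (pvCategories[0]!).2.contains l),
     g1 ++ xs.filter (fun l => (pvCategories[1]!).2.contains l),
     g2 ++ xs.filter (fun l => (pvCategories[2]!).2.contains l),
     g3 ++ xs.filter (fun l => (pvCategories[3]!).2.contains l),
     g4 ++ xs.filter (fun l => (pvCategories[4]!).2.contains l)) := by
  induction xs generalizing g0 g1 g2 g3 g4 with
  | nil => simp [pvFill]
  | cons x xs ih =>
    by_cases hx : x ∈ pvLabels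
    · simp only [pvLabels, List.mem_cons, List.not_mem_nil, or_false] at hx
      rcases hx with rfl|rfl|rfl|rfl|rfl|rfl|rfl|rfl|rfl|rfl|rfl|rfl|rfl|rfl|rfl|rfl|rfl|rfl|
        rfl|rfl|rfl|rfl|rfl|rfl|rfl|rfl|rfl|rfl|rfl|rfl|rfl|rfl|rfl|rfl|rfl <;>
      · simp [pvFill, pvIdx, PySem.Dict.get?, List.find?, pvCategories, ih]
    · have hn := pvIdx_get_none x hx
      simp only [pvLabels, List.mem_cons, List.not_mem_nil, or_false, not_or] at hx
      obtain ⟨n1,n2,n3,n4,n5,n6,n7,n8,n9,n10,n11,n12,n13,n14,n15,n16,n17,n18,n19,n20,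
             n21,n22,n23,n24,n25,n26,n27,n28,n29,n30,n31,n32,n33,n34,n35⟩ := hx
      simp [pvFill, hn, pvCategories, ih,
            n1,n2,n3,n4,n5,n6,n7,n8,n9,n10,n11,n12,n13,n14,n15,n16,n17,n18,n19,n20,
            n21,n22,n23,n24,n25,n26,n27,n28,n29,n30,n31,n32,n33,n34,n35]

-- ===== VERDICT =====
theorem analyze_vibe_spec : Claim_equal_analyze_vibe := by
  intro fl _
  unfold Spec_analyze_vibe analyze_vibe analyze_vibe_alt
  rw [pvLoop]
  simp [pvCategories]
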